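-- pv_equiv track=rewrite | github.com/daniel-bss/UraiRajut | UraiRajut.py | rajut
-- ===== SOURCE A (Python) =====
-- def rajut(kata):
--     g = list()
--     for i in kata:
--         g.append(i)
--
--     x = 0
--     y = 0
--     z = list()
--
--     while y < len(kata):
--         x += 1
--         y += x
--         z.append(x)
--
--     for i in z[:-1]:
--         for j in range(i):
--             g.pop(0)
--     k = ''
--     for i in g:
--         k += i
--
--     return k
-- ===== SOURCE B (Python) =====
-- def rajut(kata):
--     n = len(kata)
--     m = 0
--     t = 0
--     while t < n:
--         m += 1
--         t += m
--     return kata[t - m:]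
-- ===== Notes on version B (the rewrite author's own statement) =====
-- stated objective: faster
-- what changed: B computes the total number of characters to drop arithmetically with an O(sqrt(n)) counting loop and takes one slice, instead of materialising the string as a list and repeatedly pop(0)-ing one character at a time.
import Mathlib
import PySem

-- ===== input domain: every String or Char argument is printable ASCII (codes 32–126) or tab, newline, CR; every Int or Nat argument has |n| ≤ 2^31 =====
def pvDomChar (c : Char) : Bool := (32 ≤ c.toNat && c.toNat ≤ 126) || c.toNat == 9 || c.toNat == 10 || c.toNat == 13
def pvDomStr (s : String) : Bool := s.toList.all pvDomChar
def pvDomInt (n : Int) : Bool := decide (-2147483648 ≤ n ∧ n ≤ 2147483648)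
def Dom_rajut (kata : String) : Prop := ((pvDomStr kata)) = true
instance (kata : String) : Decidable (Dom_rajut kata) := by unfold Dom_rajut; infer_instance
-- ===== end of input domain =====

-- B drops the triangular-number prefix by computing the drop count with an O(sqrt n)
-- counting loop and one slice, instead of A's repeated pop(0) (objective: faster).

-- ===== PORT A =====
-- 'while y < len(kata): x += 1; y += x; z.append(x)'
def rajutZLoop (n x y : Nat) (z : List Nat) : List Nat :=
  if _h : y < n then rajutZLoop n (x + 1) (y + (x + 1)) (z ++ [x + 1]) else z
  termination_by n - y
  decreasing_by omega

-- 'for j in range(i): g.pop(0)'  (Python's pop(0) raises on an empty list; A never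
-- reaches that case, so the [] branch here is unreachable on A's actual runs)
def rajutPops (g : List Char) : Nat → List Char
  | 0 => g
  | i + 1 => rajutPops (match g with | [] => [] | _ :: t => t) i

def rajut (kata : String) : String :=
  let g := kata.toList.foldl (fun a c => a ++ [c]) []       -- for i in kata: g.append(i)
  let z := rajutZLoop kata.toList.length 0 0 []
  let g := (PySem.List.slice z none (some (-1))).foldl rajutPops g   -- for i in z[:-1]: …
  String.ofList (g.foldl (fun a c => a ++ [c]) [])          -- k = ''; for i in g: k += i

-- ===== PORT B =====
-- 'while t < n: m += 1; t += m'
def rajutAltLoop (n m t : Nat) : Nat × Nat :=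
  if h : t < n then rajutAltLoop n (m + 1) (t + (m + 1)) else (m, t)
  termination_by n - t
  decreasing_by omega

def rajut_alt (kata : String) : String :=
  let p := rajutAltLoop kata.toList.length 0 0
  String.ofList (PySem.List.slice kata.toList (some ((p.2 - p.1 : Nat) : Int)) none)  -- kata[t-m:]

-- ===== PRECONDITION & SPEC =====
def Spec_rajut (kata : String) (out : String) : Prop := out = rajut_alt kata
instance (kata : String) (out : String) : Decidable (Spec_rajut kata out) := by unfold Spec_rajut; infer_instance

-- ===== CLAIM (what is proved, stated in full; the proofs are below) =====
def Claim_equal_rajut : Prop := ∀ (kata : String), Dom_rajut kata → Spec_rajut kata (rajut kata)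

-- ===== LEMMAS AND PROOFS =====

-- the pure list [x+1, x+2, …] that A's while loop appends
def rajutZPure (n x y : Nat) : List Nat :=
  if h : y < n then (x + 1) :: rajutZPure n (x + 1) (y + (x + 1)) else []
  termination_by n - y
  decreasing_by omega

theorem rajutZLoop_eq (n x y : Nat) (z : List Nat) :
    rajutZLoop n x y z = z ++ rajutZPure n x y := by
  fun_induction rajutZPure n x y generalizing z with
  | case1 x y hlt ih =>
    rw [rajutZLoop]; simp only [dif_pos hlt]; rw [ih]; simp
  | case2 x y hlt =>
    rw [rajutZLoop]; simp only [dif_neg hlt]; simp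

theorem rajutAltLoop_eq (n m t : Nat) :
    rajutAltLoop n m t = (m + (rajutZPure n m t).length, t + (rajutZPure n m t).sum) := by
  fun_induction rajutZPure n m t with
  | case1 m t hlt ih =>
    rw [rajutAltLoop]; simp only [dif_pos hlt]; rw [ih]
    simp only [List.length_cons, List.sum_cons, Prod.mk.injEq]; omega
  | case2 m t hlt =>
    rw [rajutAltLoop]; simp only [dif_neg hlt]; simp

theorem rajutZPure_sum (n x y : Nat) :
    (rajutZPure n x y).sum =
      (rajutZPure n x y).dropLast.sum +
        (if rajutZPure n x y = [] then 0 else x + (rajutZPure n x y).length) := by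
  fun_induction rajutZPure n x y with
  | case1 x y hlt ih =>
    by_cases hp : rajutZPure n (x + 1) (y + (x + 1)) = []
    · simp [hp]
    · simp only [List.dropLast_cons_of_ne_nil hp, List.sum_cons, List.length_cons,
        if_neg (by simp : ((x+1) :: rajutZPure n (x+1) (y+(x+1))) ≠ [])]
      rw [ih, if_neg hp]
      have : (rajutZPure n (x + 1) (y + (x + 1))).length ≠ 0 := by simpa using hp
      omega
  | case2 x y hlt => simp

theorem rajutPops_eq_drop (g : List Char) (i : Nat) : rajutPops g i = g.drop i := by
  induction i generalizing g with
  | zero => simp [rajutPops]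
  | succ i ih =>
    simp only [rajutPops, ih]
    cases g <;> simp

theorem foldl_rajutPops (l : List Nat) (g : List Char) :
    l.foldl rajutPops g = g.drop l.sum := by
  induction l generalizing g with
  | nil => simp
  | cons a l ih => simp [rajutPops_eq_drop, ih, List.drop_drop]

theorem foldl_append_singleton {α : Type} (l acc : List α) :
    l.foldl (fun a c => a ++ [c]) acc = acc ++ l := by
  induction l generalizing acc with
  | nil => simp
  | cons a l ih => simp [List.foldl_cons, ih]

-- ===== VERDICT (by name: the statement is the Claim_ definition above) =====
theorem rajut_spec : Claim_equal_rajut := by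
  intro kata _
  unfold Spec_rajut
  simp only [rajut, rajut_alt, rajutZLoop_eq, rajutAltLoop_eq, foldl_append_singleton,
    foldl_rajutPops, PySem.List.slice_to_neg_one, PySem.List.slice_from_natCast,
    List.nil_append]
  congr 2
  have h := rajutZPure_sum kata.toList.length 0 0
  by_cases hp : rajutZPure kata.toList.length 0 0 = []
  · rw [hp]; rfl
  · rw [if_neg hp] at h; omega
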